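-- pv_equiv track=rewrite | github.com/daniel-reich/turbo-robot | ehyZvt6AJF4rKFfXT_13.py | uncensor
-- ===== SOURCE A (Python) =====
-- def uncensor(str1, xlate):
--     star_pos = 0; newlist = []
--     for letter in str1:
--         if letter == '*':
--             newlist.append(xlate[star_pos])
--             star_pos += 1
--         else:
--             newlist.append(letter)
--     return ''.join(newlist)
-- ===== SOURCE B (Python) =====
-- def uncensor(str1, xlate):
--     parts = str1.split('*')
--     pieces = [parts[0]]
--     for i in range(len(parts) - 1):
--         pieces.append(xlate[i])
--         pieces.append(parts[i + 1])
--     return ''.join(pieces)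
-- ===== Notes on version B (the rewrite author's own statement) =====
-- stated objective: alternative
-- what changed: B splits the string on '*' once and interleaves the segments with successive xlate entries by positional index, instead of A's character-by-character loop with a star counter.
import Mathlib
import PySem

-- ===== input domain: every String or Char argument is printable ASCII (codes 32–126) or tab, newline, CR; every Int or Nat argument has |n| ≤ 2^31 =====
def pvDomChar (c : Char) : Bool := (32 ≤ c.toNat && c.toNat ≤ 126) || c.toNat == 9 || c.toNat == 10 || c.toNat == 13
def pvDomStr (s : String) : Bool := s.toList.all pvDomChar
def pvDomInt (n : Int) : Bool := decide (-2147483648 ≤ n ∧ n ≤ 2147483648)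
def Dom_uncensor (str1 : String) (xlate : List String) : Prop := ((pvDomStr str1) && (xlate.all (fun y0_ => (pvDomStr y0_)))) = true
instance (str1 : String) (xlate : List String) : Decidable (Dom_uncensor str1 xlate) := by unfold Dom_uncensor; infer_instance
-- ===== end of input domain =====

-- B replaces A's character-by-character loop (with a star counter) by a single split on '*'
-- followed by interleaving the segments with successive xlate entries (a different decomposition, same cost).


-- ===== PORT A =====
-- xlate[star_pos] raises IndexError when star_pos ≥ len(xlate); those inputs are outside Pre_,
-- so the default "" of pyGetD is never reached there.
def uncensor (str1 : String) (xlate : List String) : String :=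
  let st := str1.toList.foldl
    (fun (st : Int × List String) letter =>
      if letter = '*' then (st.1 + 1, st.2 ++ [PySem.List.pyGetD xlate st.1 ""])
      else (st.1, st.2 ++ [String.ofList [letter]]))
    ((0 : Int), ([] : List String))
  PySem.Str.join "" st.2

-- ===== PORT B =====
-- str1.split('*') is PySem.Chars.splitOn on the char list ('*' is a non-empty separator, so
-- Python's split cannot raise); xlate[i] raises outside Pre_ exactly as in A.
def uncensor_alt (str1 : String) (xlate : List String) : String :=
  let parts : List String := (PySem.Chars.splitOn str1.toList ['*']).map String.ofList
  let pieces := (PySem.List.pyRange 0 ((parts.length : Int) - 1)).foldl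
      (fun acc i => acc ++ [PySem.List.pyGetD xlate i "", PySem.List.pyGetD parts (i + 1) ""])
      [PySem.List.pyGetD parts 0 ""]
  PySem.Str.join "" pieces

-- ===== PRECONDITION & SPEC =====
-- Pre_ excludes exactly the inputs with more '*' in str1 than entries in xlate, on which both
-- Pythons raise IndexError.
def Pre_uncensor (str1 : String) (xlate : List String) : Prop :=
  PySem.Str.count str1 "*" ≤ xlate.length
instance (str1 : String) (xlate : List String) : Decidable (Pre_uncensor str1 xlate) := by
  unfold Pre_uncensor; infer_instance
def pvWitness_uncensor : String × List String := ("wh*re w*s it", ["e", "a"])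
def Spec_uncensor (str1 : String) (xlate : List String) (out : String) : Prop := out = uncensor_alt str1 xlate
instance (str1 : String) (xlate : List String) (out : String) : Decidable (Spec_uncensor str1 xlate out) := by unfold Spec_uncensor; infer_instance

-- ===== CLAIM (what is proved, stated in full; the proofs are below) =====
def Claim_equal_uncensor : Prop := ∀ (str1 : String) (xlate : List String), Dom_uncensor str1 xlate → Pre_uncensor str1 xlate → Spec_uncensor str1 xlate (uncensor str1 xlate)

-- ===== LEMMAS AND PROOFS =====

-- A's per-character result, written as a plain recursion (star index k).
def spellU (xlate : List String) : List Char → Int → List Char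
  | [], _ => []
  | c :: cs, k =>
    if c = '*' then (PySem.List.pyGetD xlate k "").toList ++ spellU xlate cs (k + 1)
    else c :: spellU xlate cs k

-- The segments str1.split('*') produces, as a plain recursion.
def partsU : List Char → List (List Char)
  | [] => [[]]
  | c :: cs => if c = '*' then [] :: partsU cs
               else (c :: (partsU cs).headI) :: (partsU cs).tail

-- B's interleaving of segments with xlate entries, as a plain recursion.
def weaveU (xlate : List String) : List (List Char) → Int → List Char
  | [], _ => []
  | [p], _ => p
  | p :: q :: ps, k =>
    p ++ (PySem.List.pyGetD xlate k "").toList ++ weaveU xlate (q :: ps) (k + 1)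

theorem partsU_ne_nil (cs : List Char) : partsU cs ≠ [] := by
  cases cs with
  | nil => simp [partsU]
  | cons c cs => by_cases h : c = '*' <;> simp [partsU, h]

theorem intercalate_nil_eq_flatten (parts : List (List Char)) :
    List.intercalate ([] : List Char) parts = parts.flatten := by
  induction parts with
  | nil => simp [List.intercalate]
  | cons p ps ih =>
    cases ps with
    | nil => simp [List.intercalate]
    | cons q ps' =>
      simp only [List.intercalate, List.intersperse] at *
      simp_all

-- A's loop accumulates exactly spellU.
theorem uncensor_fold_spell (xlate : List String) (cs : List Char) (k : Int) (acc : List String) :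
    ((cs.foldl
      (fun (st : Int × List String) letter =>
        if letter = '*' then (st.1 + 1, st.2 ++ [PySem.List.pyGetD xlate st.1 ""])
        else (st.1, st.2 ++ [String.ofList [letter]]))
      (k, acc)).2.map String.toList).flatten
    = (acc.map String.toList).flatten ++ spellU xlate cs k := by
  induction cs generalizing k acc with
  | nil => simp [spellU]
  | cons c cs ih =>
    by_cases h : c = '*' <;>
      simp [List.foldl, h, spellU, ih, List.append_assoc]

-- splitOn's fuelled worker, under sufficient fuel, computes partsU.
theorem splitOn_go_partsU (fuel : Nat) (l cur : List Char) (acc : List (List Char))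
    (h : l.length < fuel) :
    PySem.Chars.splitOn.go ['*'] fuel l cur acc
      = acc.reverse ++ (cur.reverse ++ (partsU l).headI) :: (partsU l).tail := by
  induction fuel generalizing l cur acc with
  | zero => omega
  | succ f ih =>
    cases l with
    | nil => simp [PySem.Chars.splitOn.go, partsU]
    | cons c rest =>
      by_cases h' : c = '*'
      · subst h'
        have hne := partsU_ne_nil rest
        obtain ⟨p, ps, hps⟩ : ∃ p ps, partsU rest = p :: ps := by
          cases hp : partsU rest with
          | nil => exact absurd hp hne
          | cons p ps => exact ⟨p, ps, rfl⟩
        simp at h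
        rw [PySem.Chars.splitOn.go.eq_def]
        simp [List.isPrefixOf, ih rest [] (cur.reverse :: acc) (by omega), partsU, hps]
      · have hne := partsU_ne_nil rest
        obtain ⟨p, ps, hps⟩ : ∃ p ps, partsU rest = p :: ps := by
          cases hp : partsU rest with
          | nil => exact absurd hp hne
          | cons p ps => exact ⟨p, ps, rfl⟩
        simp at h
        rw [PySem.Chars.splitOn.go.eq_def]
        simp [List.isPrefixOf, Ne.symm h', ih rest (c :: cur) acc (by omega), partsU, hps, h']

theorem splitOn_eq_partsU (cs : List Char) :
    PySem.Chars.splitOn cs ['*'] = partsU cs := by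
  have hne := partsU_ne_nil cs
  obtain ⟨p, ps, hps⟩ : ∃ p ps, partsU cs = p :: ps := by
    cases hp : partsU cs with
    | nil => exact absurd hp hne
    | cons p ps => exact ⟨p, ps, rfl⟩
  unfold PySem.Chars.splitOn
  rw [splitOn_go_partsU (cs.length + 1) cs [] [] (by omega)]
  simp [hps]

-- spellU over the characters is weaveU over the split segments.
theorem spellU_eq_weaveU (xlate : List String) (cs : List Char) (k : Int) :
    spellU xlate cs k = weaveU xlate (partsU cs) k := by
  induction cs generalizing k with
  | nil => simp [spellU, partsU, weaveU]
  | cons c cs ih =>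
    have hne := partsU_ne_nil cs
    obtain ⟨p, ps, hps⟩ : ∃ p ps, partsU cs = p :: ps := by
      cases hp : partsU cs with
      | nil => exact absurd hp hne
      | cons p ps => exact ⟨p, ps, rfl⟩
    by_cases h : c = '*'
    · subst h
      simp [spellU, partsU, ih, hps, weaveU]
    · cases ps with
      | nil => simp [spellU, partsU, h, ih, hps, weaveU]
      | cons q ps' => simp [spellU, partsU, h, ih, hps, weaveU]

-- B's indexed flatMap over range is weaveU.
theorem flatMap_range_eq_weaveU (xlate : List String) (ps : List (List Char)) (p : List Char)
    (k : Int) :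
    p ++ (List.range ps.length).flatMap
        (fun (i : Nat) => (PySem.List.pyGetD xlate (k + (i : Int)) "").toList ++ ps.getD i [])
      = weaveU xlate (p :: ps) k := by
  induction ps generalizing p k with
  | nil => simp [weaveU]
  | cons q ps ih =>
    simp only [List.length_cons]
    rw [List.range_succ_eq_map, List.flatMap_cons, List.flatMap_map]
    have harg : (fun (a : Nat) => (PySem.List.pyGetD xlate (k + (a.succ : Int)) "").toList ++ (q :: ps).getD a.succ [])
        = (fun (a : Nat) => (PySem.List.pyGetD xlate ((k + 1) + (a : Int)) "").toList ++ ps.getD a []) := by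
      funext a
      have hk : (k + ((a : Int) + 1)) = (k + 1) + (a : Int) := by ring
      simp [hk]
    rw [harg]
    simp only [weaveU]
    rw [← ih q (k + 1)]
    simp [List.append_assoc]

theorem getD_map_ofList (ls : List (List Char)) (n : Nat) :
    ((ls.map String.ofList).getD n "").toList = ls.getD n [] := by
  have h : ("" : String) = String.ofList [] := rfl
  rw [h, List.getD_map ls [] String.ofList, String.toList_ofList]

theorem flatten_map_flatMap {α : Type} (g : α → List String) (l : List α) :
    (List.map String.toList (l.flatMap g)).flatten
      = l.flatMap (fun a => (List.map String.toList (g a)).flatten) := by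
  induction l with
  | nil => simp
  | cons x l ih => simp [ih]

-- ===== VERDICT (by name: the statement is the Claim_ definition above) =====
theorem uncensor_spec : Claim_equal_uncensor := by
  intro str1 xlate _ _
  unfold Spec_uncensor uncensor uncensor_alt
  apply String.toList_inj.mp
  rw [PySem.Str.toList_join, PySem.Str.toList_join]
  simp only [String.toList_empty, PySem.Chars.join, intercalate_nil_eq_flatten]
  rw [uncensor_fold_spell xlate str1.toList 0 [], splitOn_eq_partsU]
  obtain ⟨p, ps, hps⟩ : ∃ p ps, partsU str1.toList = p :: ps := by
    cases hp : partsU str1.toList with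
    | nil => exact absurd hp (partsU_ne_nil str1.toList)
    | cons p ps => exact ⟨p, ps, rfl⟩
  rw [hps]
  have hlen : ((((p :: ps).map String.ofList).length : Int) - 1) = ((ps.length : Nat) : Int) := by
    simp
  rw [hlen, PySem.List.pyRange_zero_natCast,
    PySem.List.foldl_append_eq_flatMap
      (fun i => [PySem.List.pyGetD xlate i "", PySem.List.pyGetD ((p :: ps).map String.ofList) (i + 1) ""]),
    List.map_append, List.flatten_append, List.flatMap_map]
  rw [flatten_map_flatMap]
  have harg : (fun (a : Nat) => (List.map String.toList
        [PySem.List.pyGetD xlate ((a : Nat) : Int) "",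
         PySem.List.pyGetD (List.map String.ofList (p :: ps)) (((a : Nat) : Int) + 1) ""]).flatten)
      = (fun (i : Nat) => (PySem.List.pyGetD xlate ((0 : Int) + (i : Int)) "").toList ++ ps.getD i []) := by
    funext a
    have hc : ((a : Int) + 1) = (((a + 1 : Nat)) : Int) := by push_cast; ring
    simp only [List.map_cons, List.map_nil, List.flatten_cons, List.flatten_nil,
      hc, PySem.List.pyGetD_natCast, getD_map_ofList, List.getD_cons_succ, List.append_nil, zero_add]
  rw [harg]
  have hhead : (List.map String.toList [PySem.List.pyGetD (List.map String.ofList (p :: ps)) 0 ""]).flatten = p := by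
    have h0 : (0 : Int) = ((0 : Nat) : Int) := rfl
    simp only [List.map_cons, List.map_nil, List.flatten_cons, List.flatten_nil, h0,
      PySem.List.pyGetD_natCast, List.getD_cons_zero, List.append_nil]
    exact String.toList_ofList
  rw [hhead, flatMap_range_eq_weaveU xlate ps p 0, ← hps, ← spellU_eq_weaveU]
  simp
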